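-- pv_equiv track=rewrite | github.com/navicatus666-creator/Cisco-Flash | ciscoautoflash/core/serial_transport.py | _metadata_score
-- ===== SOURCE A (Python) =====
-- def _metadata_score(description: str, manufacturer: str) -> int:
--     text = f"{description} {manufacturer}".lower()
--     score = 0
--     if "cisco" in text:
--         score += 120
--     if any(word in text for word in ("usb serial", "uart", "console", "serial")):
--         score += 80
--     if "com port" in text:
--         score += 20
--     if any(
--         word in text for word in ("ftdi", "prolific", "silicon labs", "ch340", "cp210", "wch")
--     ):
--         score += 40
--     if "bluetooth" in text:
--         score -= 120
--     return score
-- ===== SOURCE B (Python) =====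
-- # Single left-to-right scan over the text: at each position collect which keywords
-- # start there (startswith), then score the collected hit set; 'usb serial' is
-- # dropped because any occurrence of it already contains 'serial'.
-- _KEYWORDS = ("cisco", "uart", "console", "serial", "com port",
--              "ftdi", "prolific", "silicon labs", "ch340", "cp210", "wch",
--              "bluetooth")
--
-- def _metadata_score(description: str, manufacturer: str) -> int:
--     text = (description + " " + manufacturer).lower()
--     hits = set()
--     for i in range(len(text)):
--         for kw in _KEYWORDS:
--             if text.startswith(kw, i):
--                 hits.add(kw)
--     return (0
--             + (120 if "cisco" in hits else 0)
--             + (80 if any(k in hits for k in ("uart", "console", "serial")) else 0)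
--             + (20 if "com port" in hits else 0)
--             + (40 if any(k in hits for k in ("ftdi", "prolific", "silicon labs",
--                                             "ch340", "cp210", "wch")) else 0)
--             + (-120 if "bluetooth" in hits else 0))
-- ===== Notes on version B (the rewrite author's own statement) =====
-- stated objective: alternative
-- what changed: Instead of testing each keyword for substring membership independently, B makes one left-to-right scan over the lowercased text, collecting at each position the keywords that start there into a hit set, then scores the hit set; the redundant keyword 'usb serial' is dropped since any occurrence of it contains 'serial'.
import Mathlib
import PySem

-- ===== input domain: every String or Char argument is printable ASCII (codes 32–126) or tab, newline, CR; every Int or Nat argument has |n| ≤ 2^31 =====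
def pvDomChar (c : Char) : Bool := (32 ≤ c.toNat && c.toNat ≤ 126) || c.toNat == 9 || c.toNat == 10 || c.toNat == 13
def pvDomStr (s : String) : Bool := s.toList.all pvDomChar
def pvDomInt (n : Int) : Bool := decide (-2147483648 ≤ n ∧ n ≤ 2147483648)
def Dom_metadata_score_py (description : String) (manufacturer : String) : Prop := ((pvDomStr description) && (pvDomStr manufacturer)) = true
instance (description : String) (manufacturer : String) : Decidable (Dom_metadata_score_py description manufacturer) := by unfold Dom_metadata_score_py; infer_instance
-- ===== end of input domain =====

-- B replaces A's per-keyword substring tests by ONE left-to-right scan over the text that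
-- collects, at each position, the keywords starting there (prefix tests) into a hit set,
-- then scores that set; 'usb serial' is dropped since it always contains 'serial'.

-- ===== PORT A =====
def metadata_score_py (description : String) (manufacturer : String) : Int :=
  let text := PySem.Str.lower (PySem.Str.join " " [description, manufacturer])
  let score : Int := 0
  let score := if PySem.Str.isIn "cisco" text then score + 120 else score
  let score := if (["usb serial", "uart", "console", "serial"].any (fun w => PySem.Str.isIn w text)) then score + 80 else score
  let score := if PySem.Str.isIn "com port" text then score + 20 else score
  let score := if (["ftdi", "prolific", "silicon labs", "ch340", "cp210", "wch"].any (fun w => PySem.Str.isIn w text)) then score + 40 else score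
  let score := if PySem.Str.isIn "bluetooth" text then score - 120 else score
  score

-- ===== PORT B =====
def pvKeywords : List String :=
  ["cisco", "uart", "console", "serial", "com port",
   "ftdi", "prolific", "silicon labs", "ch340", "cp210", "wch", "bluetooth"]

-- the scan over positions i of the text: at each suffix, add every keyword starting there
def pvScan : List Char → PySem.Set String → PySem.Set String
  | [], hits => hits
  | c :: rest, hits =>
      pvScan rest (pvKeywords.foldl
        (fun h kw => if PySem.Chars.startswith (c :: rest) kw.toList then PySem.Set.add h kw else h) hits)

def metadata_score_py_alt (description : String) (manufacturer : String) : Int :=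
  let text := PySem.Str.lower (PySem.Str.join " " [description, manufacturer])
  let hits := pvScan text.toList PySem.Set.empty
  (0 : Int)
    + (if PySem.Set.contains hits "cisco" then (120 : Int) else 0)
    + (if (["uart", "console", "serial"].any (fun k => PySem.Set.contains hits k)) then (80 : Int) else 0)
    + (if PySem.Set.contains hits "com port" then (20 : Int) else 0)
    + (if (["ftdi", "prolific", "silicon labs", "ch340", "cp210", "wch"].any (fun k => PySem.Set.contains hits k)) then (40 : Int) else 0)
    + (if PySem.Set.contains hits "bluetooth" then (-120 : Int) else 0)

-- ===== PRECONDITION & SPEC =====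
def Spec_metadata_score_py (description : String) (manufacturer : String) (out : Int) : Prop := out = metadata_score_py_alt description manufacturer
instance (description : String) (manufacturer : String) (out : Int) : Decidable (Spec_metadata_score_py description manufacturer out) := by unfold Spec_metadata_score_py; infer_instance

-- ===== CLAIM =====
def Claim_equal_metadata_score_py : Prop := ∀ (description : String) (manufacturer : String), Dom_metadata_score_py description manufacturer → Spec_metadata_score_py description manufacturer (metadata_score_py description manufacturer)

-- ===== LEMMAS AND PROOFS =====

-- one position's inner loop over the keyword list
theorem pv_mem_foldl (ks : List String) (s : List Char) (hits : PySem.Set String) (kw : String) :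
    kw ∈ ks.foldl (fun h k => if PySem.Chars.startswith s k.toList then PySem.Set.add h k else h) hits ↔
      kw ∈ hits ∨ (kw ∈ ks ∧ PySem.Chars.startswith s kw.toList = true) := by
  induction ks generalizing hits with
  | nil => simp
  | cons k ks ih =>
    simp only [List.foldl_cons, List.mem_cons]
    rcases hsw : PySem.Chars.startswith s k.toList with _ | _
    · simp only [Bool.false_eq_true, if_false, ih]
      constructor
      · rintro (h1 | ⟨h2, h3⟩)
        · exact Or.inl h1
        · exact Or.inr ⟨Or.inr h2, h3⟩
      · rintro (h1 | ⟨(rfl | h2), h3⟩)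
        · exact Or.inl h1
        · rw [hsw] at h3; cases h3
        · exact Or.inr ⟨h2, h3⟩
    · simp only [if_true, ih, PySem.Set.mem_add]
      constructor
      · rintro ((h1 | rfl) | ⟨h2, h3⟩)
        · exact Or.inl h1
        · exact Or.inr ⟨Or.inl rfl, hsw⟩
        · exact Or.inr ⟨Or.inr h2, h3⟩
      · rintro (h1 | ⟨(rfl | h2), h3⟩)
        · exact Or.inl (Or.inl h1)
        · exact Or.inl (Or.inr rfl)
        · exact Or.inr ⟨h2, h3⟩

theorem pv_mem_scan (s : List Char) (hits : PySem.Set String) (kw : String) (hkw : kw.toList ≠ []) :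
    kw ∈ pvScan s hits ↔ kw ∈ hits ∨ (kw ∈ pvKeywords ∧ ∃ j, kw.toList <+: s.drop j) := by
  induction s generalizing hits with
  | nil =>
    simp only [pvScan, List.drop_nil, List.prefix_nil]
    simp [hkw]
  | cons c rest ih =>
    rw [pvScan, ih, pv_mem_foldl]
    have hdrop : (∃ j, kw.toList <+: (c :: rest).drop j) ↔
        (kw.toList <+: (c :: rest)) ∨ ∃ j, kw.toList <+: rest.drop j := by
      constructor
      · rintro ⟨j, hj⟩
        cases j with
        | zero => exact Or.inl hj
        | succ j => exact Or.inr ⟨j, hj⟩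
      · rintro (h | ⟨j, hj⟩)
        · exact ⟨0, h⟩
        · exact ⟨j + 1, hj⟩
    rw [hdrop, PySem.Chars.startswith_iff]
    tauto

theorem pv_contains_scan (l : List Char) (kw : String) (h1 : kw ∈ pvKeywords) (h2 : kw.toList ≠ []) :
    PySem.Set.contains (pvScan l PySem.Set.empty) kw = PySem.Chars.isIn kw.toList l := by
  have hiff := PySem.Chars.exists_prefix_drop_iff_isIn (sub := kw.toList) (s := l)
  rcases hb : PySem.Chars.isIn kw.toList l with _ | _
  · rw [hb] at hiff
    rw [← Bool.not_eq_true, PySem.Set.contains_iff, pv_mem_scan l _ kw h2]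
    simp only [PySem.Set.empty, List.not_mem_nil, false_or, not_and]
    intro _ h
    exact absurd (hiff.mp h) (by simp)
  · rw [hb] at hiff
    rw [PySem.Set.contains_iff, pv_mem_scan l _ kw h2]
    exact Or.inr ⟨h1, hiff.mpr rfl⟩

theorem pv_usb_serial (l : List Char) (h : PySem.Chars.isIn "usb serial".toList l = true) :
    PySem.Chars.isIn "serial".toList l = true := by
  rw [PySem.Chars.isIn_iff_infix] at h ⊢
  exact List.IsInfix.trans (by decide) h

-- ===== VERDICT =====
-- the combined text, named so the ports' bodies are definitionally instances of pvF / pvG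
def pvTextOf (d m : String) : String := PySem.Str.lower (PySem.Str.join " " [d, m])

-- A's let-chain with its five conditions abstracted
def pvF (c1 c2 c3 c4 c5 : Bool) : Int :=
  let score : Int := 0
  let score := if c1 then score + 120 else score
  let score := if c2 then score + 80 else score
  let score := if c3 then score + 20 else score
  let score := if c4 then score + 40 else score
  let score := if c5 then score - 120 else score
  score

-- B's sum with its five conditions abstracted
def pvG (c1 c2 c3 c4 c5 : Bool) : Int :=
  (0 : Int) + (if c1 then (120 : Int) else 0) + (if c2 then (80 : Int) else 0)
    + (if c3 then (20 : Int) else 0) + (if c4 then (40 : Int) else 0)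
    + (if c5 then (-120 : Int) else 0)

theorem pvFG (c1 c2 c3 c4 c5 : Bool) : pvF c1 c2 c3 c4 c5 = pvG c1 c2 c3 c4 c5 := by
  cases c1 <;> cases c2 <;> cases c3 <;> cases c4 <;> cases c5 <;> rfl

theorem pvA_eq (d m : String) : metadata_score_py d m =
    pvF (PySem.Str.isIn "cisco" (pvTextOf d m))
      (["usb serial", "uart", "console", "serial"].any (fun w => PySem.Str.isIn w (pvTextOf d m)))
      (PySem.Str.isIn "com port" (pvTextOf d m))
      (["ftdi", "prolific", "silicon labs", "ch340", "cp210", "wch"].any (fun w => PySem.Str.isIn w (pvTextOf d m)))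
      (PySem.Str.isIn "bluetooth" (pvTextOf d m)) := rfl

theorem pvB_eq (d m : String) : metadata_score_py_alt d m =
    pvG (PySem.Set.contains (pvScan (pvTextOf d m).toList PySem.Set.empty) "cisco")
      (["uart", "console", "serial"].any (fun k => PySem.Set.contains (pvScan (pvTextOf d m).toList PySem.Set.empty) k))
      (PySem.Set.contains (pvScan (pvTextOf d m).toList PySem.Set.empty) "com port")
      (["ftdi", "prolific", "silicon labs", "ch340", "cp210", "wch"].any (fun k => PySem.Set.contains (pvScan (pvTextOf d m).toList PySem.Set.empty) k))
      (PySem.Set.contains (pvScan (pvTextOf d m).toList PySem.Set.empty) "bluetooth") := rfl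

-- a hit-set lookup is a substring test
theorem pv_contains_eq (t : String) (kw : String) (h1 : kw ∈ pvKeywords) (h2 : kw.toList ≠ []) :
    PySem.Set.contains (pvScan t.toList PySem.Set.empty) kw = PySem.Str.isIn kw t := by
  rw [pv_contains_scan t.toList kw h1 h2]
  simp

-- A's four-keyword group equals B's three-keyword group: 'usb serial' is subsumed by 'serial'
theorem pv_group2 (t : String) :
    (["usb serial", "uart", "console", "serial"].any (fun w => PySem.Str.isIn w t)) =
      (["uart", "console", "serial"].any (fun k => PySem.Set.contains (pvScan t.toList PySem.Set.empty) k)) := by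
  simp only [List.any_cons, List.any_nil,
    pv_contains_eq t "uart" (by decide) (by decide),
    pv_contains_eq t "console" (by decide) (by decide),
    pv_contains_eq t "serial" (by decide) (by decide)]
  rcases hu : PySem.Str.isIn "usb serial" t with _ | _
  · rw [Bool.false_or]
  · have hs : PySem.Str.isIn "serial" t = true := by
      rw [PySem.Str.isIn_eq] at hu ⊢
      exact pv_usb_serial t.toList hu
    simp only [hs, Bool.true_or, Bool.or_true]

theorem pv_group4 (t : String) :
    (["ftdi", "prolific", "silicon labs", "ch340", "cp210", "wch"].any (fun w => PySem.Str.isIn w t)) =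
      (["ftdi", "prolific", "silicon labs", "ch340", "cp210", "wch"].any
        (fun k => PySem.Set.contains (pvScan t.toList PySem.Set.empty) k)) := by
  simp only [List.any_cons, List.any_nil,
    pv_contains_eq t "ftdi" (by decide) (by decide),
    pv_contains_eq t "prolific" (by decide) (by decide),
    pv_contains_eq t "silicon labs" (by decide) (by decide),
    pv_contains_eq t "ch340" (by decide) (by decide),
    pv_contains_eq t "cp210" (by decide) (by decide),
    pv_contains_eq t "wch" (by decide) (by decide)]

-- ===== VERDICT =====
theorem metadata_score_py_spec : Claim_equal_metadata_score_py := by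
  intro d m _
  unfold Spec_metadata_score_py
  rw [pvA_eq, pvB_eq, pvFG,
      pv_contains_eq (pvTextOf d m) "cisco" (by decide) (by decide),
      pv_contains_eq (pvTextOf d m) "com port" (by decide) (by decide),
      pv_contains_eq (pvTextOf d m) "bluetooth" (by decide) (by decide),
      pv_group2 (pvTextOf d m), pv_group4 (pvTextOf d m)]
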